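-- pv_equiv track=rewrite | github.com/snical/pythlings | pythlings/cli.py | summarize_stderr
-- ===== SOURCE A (Python) =====
-- def summarize_stderr(stderr: str) -> tuple[str | None, str | None]:
--     lines = [line.rstrip() for line in stderr.splitlines() if line.strip()]
--     if not lines:
--         return None, None
--
--     location = next(
--         (line.strip() for line in lines if line.lstrip().startswith("File ")), None
--     )
--     return location, lines[-1].strip()
-- ===== SOURCE B (Python) =====
-- def summarize_stderr(stderr: str) -> tuple[str | None, str | None]:
--     location = None
--     last = None
--     for line in stderr.splitlines():
--         s = line.strip()
--         if not s:
--             continue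
--         last = s
--         if location is None and s.startswith("File "):
--             location = s
--     return location, last
-- ===== Notes on version B (the rewrite author's own statement) =====
-- stated objective: simpler
-- what changed: Replaces A's build-a-filtered-list + next(generator) + lines[-1] (three traversals and an intermediate list) with a single forward pass over splitlines keeping two locals (first 'File ' line and last non-blank line, both stripped).
import Mathlib
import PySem

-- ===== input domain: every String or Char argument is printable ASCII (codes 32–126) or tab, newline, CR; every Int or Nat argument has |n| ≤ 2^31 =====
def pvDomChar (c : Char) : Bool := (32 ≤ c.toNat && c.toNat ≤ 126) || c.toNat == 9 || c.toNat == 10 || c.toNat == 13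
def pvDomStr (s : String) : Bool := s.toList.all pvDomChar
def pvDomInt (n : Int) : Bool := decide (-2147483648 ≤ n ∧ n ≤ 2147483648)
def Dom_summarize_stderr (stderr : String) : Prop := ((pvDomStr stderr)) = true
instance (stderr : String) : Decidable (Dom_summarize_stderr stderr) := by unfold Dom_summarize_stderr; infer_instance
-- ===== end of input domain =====

-- B replaces A's filtered list + next(...) + lines[-1] with one forward pass keeping two locals (simpler: one traversal, no intermediate list).

-- ===== PORT A =====
def summarize_stderr (stderr : String) : Option String × Option String :=
  let lines := ((PySem.Str.splitlines stderr).filter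
      (fun line => PySem.Str.strip line != "")).map (fun line => PySem.Str.rstrip line)
  if lines = [] then (none, none)
  else
    let location :=
      (lines.find? (fun line => PySem.Str.startswith (PySem.Str.lstrip line) "File ")).map
        (fun line => PySem.Str.strip line)
    (location, (PySem.List.pyGet? lines (-1)).map (fun l => PySem.Str.strip l))

-- ===== PORT B =====
def summarize_stderr_alt (stderr : String) : Option String × Option String :=
  (PySem.Str.splitlines stderr).foldl
    (fun acc line =>
      let s := PySem.Str.strip line
      if s = "" then acc
      else (if acc.1 = none ∧ PySem.Str.startswith s "File " then some s else acc.1, some s))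
    (none, none)

-- ===== PRECONDITION & SPEC =====
def Spec_summarize_stderr (stderr : String) (out : Option String × Option String) : Prop := out = summarize_stderr_alt stderr
instance (stderr : String) (out : Option String × Option String) : Decidable (Spec_summarize_stderr stderr out) := by unfold Spec_summarize_stderr; infer_instance

-- ===== CLAIM (what is proved, stated in full; the proofs are below) =====
def Claim_equal_summarize_stderr : Prop := ∀ (stderr : String), Dom_summarize_stderr stderr → Spec_summarize_stderr stderr (summarize_stderr stderr)

-- ===== LEMMAS AND PROOFS =====

-- dropWhile from the left commutes with dropWhile from the right (through reverse)
theorem dropWhile_rev_comm {α : Type} (p : α → Bool) (l : List α) :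
    List.dropWhile p ((List.dropWhile p l.reverse).reverse)
      = (List.dropWhile p (List.dropWhile p l).reverse).reverse := by
  induction l with
  | nil => simp
  | cons a t ih =>
    by_cases hpa : p a = true
    · by_cases h : List.dropWhile p t.reverse = []
      · simp [List.reverse_cons, List.dropWhile_append, List.dropWhile_cons, h, hpa, ← ih]
      · simp [List.reverse_cons, List.dropWhile_append, List.dropWhile_cons, h, hpa, ← ih]
    · have hpa' : p a = false := by simpa using hpa
      by_cases h : List.dropWhile p t.reverse = []
      · simp [List.reverse_cons, List.dropWhile_append, List.dropWhile_cons, h, hpa']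
      · simp [List.reverse_cons, List.dropWhile_append, List.dropWhile_cons, h, hpa']

-- dropWhile is idempotent
theorem dropWhile_idem {α : Type} (p : α → Bool) (l : List α) :
    List.dropWhile p (List.dropWhile p l) = List.dropWhile p l := by
  induction l with
  | nil => simp
  | cons a t ih =>
    by_cases hpa : p a = true
    · simp [List.dropWhile_cons, hpa, ih]
    · have hpa' : p a = false := by simpa using hpa
      simp [List.dropWhile_cons, hpa']

theorem chars_lstrip_rstrip (cs : List Char) :
    PySem.Chars.lstrip (PySem.Chars.rstrip cs) = PySem.Chars.strip cs := by
  simp only [PySem.Chars.lstrip, PySem.Chars.rstrip, PySem.Chars.strip]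
  exact dropWhile_rev_comm _ cs

theorem chars_rstrip_idem (cs : List Char) :
    PySem.Chars.rstrip (PySem.Chars.rstrip cs) = PySem.Chars.rstrip cs := by
  simp only [PySem.Chars.rstrip, List.reverse_reverse, dropWhile_idem]

theorem chars_strip_rstrip (cs : List Char) :
    PySem.Chars.strip (PySem.Chars.rstrip cs) = PySem.Chars.strip cs := by
  have h1 : PySem.Chars.strip (PySem.Chars.rstrip cs)
      = PySem.Chars.rstrip (PySem.Chars.lstrip (PySem.Chars.rstrip cs)) := rfl
  rw [h1, chars_lstrip_rstrip]
  show PySem.Chars.rstrip (PySem.Chars.rstrip (PySem.Chars.lstrip cs)) = _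
  rw [chars_rstrip_idem]
  rfl

theorem lstrip_rstrip (s : String) :
    PySem.Str.lstrip (PySem.Str.rstrip s) = PySem.Str.strip s := by
  simp only [PySem.Str.lstrip, PySem.Str.strip, PySem.Str.toList_rstrip]
  rw [chars_lstrip_rstrip]

theorem strip_rstrip (s : String) :
    PySem.Str.strip (PySem.Str.rstrip s) = PySem.Str.strip s := by
  simp only [PySem.Str.strip, PySem.Str.toList_rstrip]
  rw [chars_strip_rstrip]

theorem pyGet_neg_one {α : Type} (l : List α) : PySem.List.pyGet? l (-1) = l.getLast? := by
  cases l with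
  | nil => rfl
  | cons a t =>
    simp only [PySem.List.pyGet?, PySem.List.pyIdx?]
    norm_num
    rw [List.getLast?_eq_getElem?]
    simp

theorem getLast?_cons_or {α : Type} (a : α) (l : List α) :
    (a :: l).getLast? = l.getLast?.or (some a) := by
  induction l generalizing a with
  | nil => simp
  | cons b bs ih =>
    rw [List.getLast?_cons_cons]
    simp [ih, Option.or_assoc, Option.some_or]

-- the stripped non-blank lines of L
def pvStripped (L : List String) : List String :=
  (L.filter (fun l => PySem.Str.strip l != "")).map (fun l => PySem.Str.strip l)

-- characterisation of B's fold
theorem foldB (L : List String) (acc : Option String × Option String) :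
    L.foldl
      (fun acc line =>
        let s := PySem.Str.strip line
        if s = "" then acc
        else (if acc.1 = none ∧ PySem.Str.startswith s "File " then some s else acc.1, some s))
      acc
    = (acc.1.or ((pvStripped L).find? (fun s => PySem.Str.startswith s "File ")),
       ((pvStripped L).getLast?).or acc.2) := by
  induction L generalizing acc with
  | nil => simp [pvStripped]
  | cons a t ih =>
    by_cases h : PySem.Str.strip a = ""
    · simp only [List.foldl_cons, h, ite_true]
      rw [ih]
      have hrw : pvStripped (a :: t) = pvStripped t := by
        simp [pvStripped, List.filter_cons, h]
      rw [hrw]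
    · simp only [List.foldl_cons, if_neg h]
      rw [ih]
      have hrw : pvStripped (a :: t) = PySem.Str.strip a :: pvStripped t := by
        simp [pvStripped, List.filter_cons, h]
      rw [hrw]
      refine Prod.ext ?_ ?_
      · dsimp only
        by_cases hl : acc.1 = none
        · by_cases hs : PySem.Str.startswith (PySem.Str.strip a) "File " = true
          · rw [if_pos ⟨hl, hs⟩, Option.some_or, hl, Option.none_or,
              List.find?_cons_of_pos (p := fun s => PySem.Str.startswith s "File ") hs]
          · have hs' : PySem.Str.startswith (PySem.Str.strip a) "File " = false := by
              simpa using hs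
            rw [if_neg (fun hc => absurd hc.2 (by rw [hs']; simp)),
              List.find?_cons_of_neg (by rw [hs']; simp), hl]
        · obtain ⟨v, hv⟩ := Option.ne_none_iff_exists'.mp hl
          rw [if_neg (fun hc => absurd hc.1 (by rw [hv]; simp)),
            hv, Option.some_or, Option.some_or]
      · dsimp only
        rw [getLast?_cons_or, Option.or_assoc, Option.some_or]

-- A-side post-processing of the filtered lines, expressed on the stripped lines
theorem sideA (flt : List String) :
    ( ((flt.map (fun line => PySem.Str.rstrip line)).find?
        (fun line => PySem.Str.startswith (PySem.Str.lstrip line) "File ")).map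
          (fun line => PySem.Str.strip line),
      (PySem.List.pyGet? (flt.map (fun line => PySem.Str.rstrip line)) (-1)).map
        (fun l => PySem.Str.strip l) )
    = ( (flt.map (fun l => PySem.Str.strip l)).find? (fun s => PySem.Str.startswith s "File "),
        (flt.map (fun l => PySem.Str.strip l)).getLast? ) := by
  refine Prod.ext ?_ ?_
  · dsimp only
    rw [List.find?_map, List.find?_map, Option.map_map]
    have hq : ((fun line => PySem.Str.startswith (PySem.Str.lstrip line) "File ")
          ∘ (fun line => PySem.Str.rstrip line))
        = ((fun s => PySem.Str.startswith s "File ") ∘ (fun l => PySem.Str.strip l)) := by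
      funext l
      simp [Function.comp, lstrip_rstrip]
    rw [hq]
    have hm : ((fun line => PySem.Str.strip line) ∘ (fun line => PySem.Str.rstrip line))
        = (fun l => PySem.Str.strip l) := funext fun l => strip_rstrip l
    rw [hm]
  · dsimp only
    rw [pyGet_neg_one, List.getLast?_map, List.getLast?_map, Option.map_map]
    have hm : ((fun l => PySem.Str.strip l) ∘ (fun line => PySem.Str.rstrip line))
        = (fun l => PySem.Str.strip l) := funext fun l => strip_rstrip l
    rw [hm]

theorem summarize_stderr_eq (stderr : String) :
    summarize_stderr stderr = summarize_stderr_alt stderr := by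
  simp only [summarize_stderr, summarize_stderr_alt]
  rw [foldB]
  simp only [Option.none_or, Option.or_none]
  by_cases hE : (PySem.Str.splitlines stderr).filter (fun l => PySem.Str.strip l != "") = []
  · rw [hE]
    simp [pvStripped, hE]
  · have hmapne : ((PySem.Str.splitlines stderr).filter (fun l => PySem.Str.strip l != "")).map
        (fun line => PySem.Str.rstrip line) ≠ [] := by simpa using hE
    rw [if_neg hmapne]
    unfold pvStripped
    exact sideA _

-- ===== VERDICT (by name: the statement is the Claim_ definition above) =====
theorem summarize_stderr_spec : Claim_equal_summarize_stderr := by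
  intro stderr _
  unfold Spec_summarize_stderr
  exact summarize_stderr_eq stderr
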